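-- pv_equiv track=rewrite | github.com/levanin/SIKE-Python | strategies.py | compute_strategy
-- ===== SOURCE A (Python) =====
-- def compute_strategy(ell, e):
--         """
--         Computes the optimal strategy for a given ell and exponent e
--         Source: https://github.com/JJChiDguez/sibc/blob/master/sibc/sidh/strategy.py
--         Assumes cost of multiplication and squaring is equivalent (and additions neglible)
--         """
--         # My intuition says, e = 1 mod 2 can be improved
--         n = {2:(e//2), 3:e}[ell]
--         p = 12          # Both of x([4]P) and x([3]P) cost 4S + 8M, assuming M=S we have a cost of 12 multiplications
--         q = {2:8, 3:6}[ell]  # cost of a degree-4 and degree-3 isogeny evaluation (6M + 2S + 6a and 4M + 2S + 4a, respectively)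
--
--         S = {1:[]}
--         C = {1:0 }
--         for i in range(2, n+1):
--             b, cost = min(((b, C[i-b] + C[b] + b*p + (i-b)*q) for b in range(1,i)), key=lambda t: t[1])
--             S[i] = [b] + S[i-b] + S[b]
--             C[i] = cost
--
--         return S[n], C[n]
-- ===== SOURCE B (Python) =====
-- def compute_strategy(ell, e):
--     """Cost-only DP with a split table, then a separate recursive
--     reconstruction of the strategy list (A builds the lists inside the DP loop)."""
--     n = {2: (e // 2), 3: e}[ell]
--     p = 12
--     q = {2: 8, 3: 6}[ell]
--
--     C = {1: 0}
--     split = {}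
--     for i in range(2, n + 1):
--         best_b = 1
--         best = C[i - 1] + C[1] + 1 * p + (i - 1) * q
--         for b in range(2, i):
--             cost = C[i - b] + C[b] + b * p + (i - b) * q
--             if cost < best:
--                 best_b = b
--                 best = cost
--         C[i] = best
--         split[i] = best_b
--
--     def strat(i):
--         if i == 1:
--             return []
--         b = split[i]
--         return [b] + strat(i - b) + strat(b)
--
--     return strat(n), C[n]
-- ===== Notes on version B (the rewrite author's own statement) =====
-- stated objective: faster
-- what changed: A builds every strategy list inside the DP loop by list concatenation; B runs a cost-only DP that records just the chosen split point per index (with an explicit seeded running-minimum loop instead of min(generator, key=...)) and reconstructs the single strategy list afterwards by a separate recursive pass over the split table.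
import Mathlib
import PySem

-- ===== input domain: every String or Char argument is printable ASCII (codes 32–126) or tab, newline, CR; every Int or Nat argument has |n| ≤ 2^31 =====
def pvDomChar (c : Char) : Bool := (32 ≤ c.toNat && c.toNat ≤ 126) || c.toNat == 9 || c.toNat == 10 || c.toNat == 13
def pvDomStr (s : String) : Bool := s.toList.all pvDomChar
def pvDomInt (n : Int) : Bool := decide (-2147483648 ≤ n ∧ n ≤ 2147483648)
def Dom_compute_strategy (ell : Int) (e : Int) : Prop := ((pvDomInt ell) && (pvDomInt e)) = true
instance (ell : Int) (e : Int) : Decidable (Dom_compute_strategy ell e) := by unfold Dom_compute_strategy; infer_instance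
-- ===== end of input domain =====

-- B computes a cost-only DP with a split table and reconstructs the strategy list in a
-- separate recursive pass, replacing A's per-iteration list concatenations (objective:
-- faster by a constant factor; same O(n^2) cost DP).

-- ===== PORT A =====
-- loop body of A: pairs (b, C[i-b]+C[b]+b*p+(i-b)*q) for b in range(1,i); Python's
-- min(..., key=t[1]) (first minimum) is PySem.List.minD with key .2 — the list is
-- nonempty since i ≥ 2, so the default is never used (Python would raise on empty).
def stepA (p q : Int) (st : PySem.Dict Int (List Int) × PySem.Dict Int Int) (i : Int) :
    PySem.Dict Int (List Int) × PySem.Dict Int Int :=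
  let S := st.1
  let C := st.2
  let pr := PySem.List.minD
    ((PySem.List.pyRange 1 i 1).map
      (fun b => (b, C.getD (i - b) 0 + C.getD b 0 + b * p + (i - b) * q)))
    (fun t => t.2) (0, 0)
  (S.insert i (pr.1 :: (S.getD (i - pr.1) [] ++ S.getD pr.1 [])), C.insert i pr.2)

-- dict lookups S[j]/C[j] are ported as getD with a dummy default: under Pre_ every
-- looked-up key is present (Python raises KeyError exactly on the inputs Pre_ excludes).
def compute_strategy (ell : Int) (e : Int) : List Int × Int :=
  let n := (PySem.Dict.ofList [((2 : Int), PySem.Int.floordiv e 2), (3, e)]).getD ell 0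
  let p : Int := 12
  let q := (PySem.Dict.ofList [((2 : Int), (8 : Int)), (3, 6)]).getD ell 0
  let fin := (PySem.List.pyRange 2 (n + 1) 1).foldl (stepA p q)
    (PySem.Dict.ofList [((1 : Int), ([] : List Int))], PySem.Dict.ofList [((1 : Int), (0 : Int))])
  (fin.1.getD n [], fin.2.getD n 0)

-- ===== PORT B =====
-- inner loop of B: running (best_b, best) over b in range(2,i), seeded with b = 1
def innerB (C : PySem.Dict Int Int) (p q i : Int) : Int × Int :=
  (PySem.List.pyRange 2 i 1).foldl
    (fun st b =>
      let cost := C.getD (i - b) 0 + C.getD b 0 + b * p + (i - b) * q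
      if cost < st.2 then (b, cost) else st)
    (1, C.getD (i - 1) 0 + C.getD 1 0 + 1 * p + (i - 1) * q)

def stepB (p q : Int) (st : PySem.Dict Int Int × PySem.Dict Int Int) (i : Int) :
    PySem.Dict Int Int × PySem.Dict Int Int :=
  let pr := innerB st.1 p q i
  (st.1.insert i pr.2, st.2.insert i pr.1)

-- B's recursive reconstruction 'strat'; the fuel argument only makes the same recursion
-- structurally total (fuel n.toNat suffices: the recursion arguments strictly decrease).
def stratB (split : PySem.Dict Int Int) : Nat → Int → List Int
  | 0, _ => []
  | f + 1, i =>
    if i = 1 then []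
    else
      let b := split.getD i 0
      b :: (stratB split f (i - b) ++ stratB split f b)

def compute_strategy_alt (ell : Int) (e : Int) : List Int × Int :=
  let n := (PySem.Dict.ofList [((2 : Int), PySem.Int.floordiv e 2), (3, e)]).getD ell 0
  let p : Int := 12
  let q := (PySem.Dict.ofList [((2 : Int), (8 : Int)), (3, 6)]).getD ell 0
  let fin := (PySem.List.pyRange 2 (n + 1) 1).foldl (stepB p q)
    (PySem.Dict.ofList [((1 : Int), (0 : Int))], PySem.Dict.empty)
  (stratB fin.2 n.toNat n, fin.1.getD n 0)

-- ===== PRECONDITION & SPEC =====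
-- Pre_ excludes exactly the inputs where A raises: KeyError on ell ∉ {2,3} (the literal
-- dict lookups) and KeyError S[n] when n = {2: e//2, 3: e}[ell] < 1 (loop never fills n).
def Pre_compute_strategy (ell : Int) (e : Int) : Prop :=
  (ell = 2 ∧ 2 ≤ e) ∨ (ell = 3 ∧ 1 ≤ e)
instance (ell : Int) (e : Int) : Decidable (Pre_compute_strategy ell e) := by
  unfold Pre_compute_strategy; infer_instance

def pvWitness_compute_strategy : Int × Int := (3, 5)

def Spec_compute_strategy (ell : Int) (e : Int) (out : List Int × Int) : Prop := out = compute_strategy_alt ell e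
instance (ell : Int) (e : Int) (out : List Int × Int) : Decidable (Spec_compute_strategy ell e out) := by unfold Spec_compute_strategy; infer_instance

-- ===== CLAIM (what is proved, stated in full; the proofs are below) =====
def Claim_equal_compute_strategy : Prop := ∀ (ell : Int) (e : Int), Dom_compute_strategy ell e → Pre_compute_strategy ell e → Spec_compute_strategy ell e (compute_strategy ell e)

-- ===== LEMMAS AND PROOFS =====

-- abbreviations for the two loops (proof-only helpers)
def foldA (p q n : Int) : PySem.Dict Int (List Int) × PySem.Dict Int Int :=
  (PySem.List.pyRange 2 (n + 1) 1).foldl (stepA p q)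
    (PySem.Dict.ofList [((1 : Int), ([] : List Int))], PySem.Dict.ofList [((1 : Int), (0 : Int))])

def foldB (p q n : Int) : PySem.Dict Int Int × PySem.Dict Int Int :=
  (PySem.List.pyRange 2 (n + 1) 1).foldl (stepB p q)
    (PySem.Dict.ofList [((1 : Int), (0 : Int))], PySem.Dict.empty)

-- split table soundness: every recorded split lies strictly between 0 and its key
def GoodSplit (split : PySem.Dict Int Int) (m : Int) : Prop :=
  ∀ j, 2 ≤ j → j ≤ m → 1 ≤ split.getD j 0 ∧ split.getD j 0 < j

-- the running invariant of the two loops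
def LoopInv (p q m : Int) : Prop :=
  (foldA p q m).2 = (foldB p q m).1 ∧
  GoodSplit (foldB p q m).2 m ∧
  ∀ j, 1 ≤ j → j ≤ m → ∀ f, j.toNat ≤ f →
    (foldA p q m).1.getD j [] = stratB (foldB p q m).2 f j

-- Python's min over the mapped range(1,i) equals B's seeded running-minimum loop
lemma min?_cons_pair : ∀ (l : List (Int × Int)) (a : Int × Int),
    PySem.List.min? (a :: l) (fun t => t.2) = some (l.foldl (fun m x => if x.2 < m.2 then x else m) a) := by
  intro l
  induction l with
  | nil => intro a; rfl
  | cons x t ih =>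
    intro a
    have h1 : PySem.List.min? (a :: x :: t) (fun t => t.2)
        = PySem.List.min? ((if x.2 < a.2 then x else a) :: t) (fun t => t.2) := by
      by_cases h : x.2 < a.2 <;> simp [PySem.List.min?, h]
    rw [h1, ih]
    simp only [List.foldl_cons]

lemma minD_cons_pair (l : List (Int × Int)) (a : Int × Int) :
    PySem.List.minD (a :: l) (fun t => t.2) ((0 : Int), (0 : Int))
      = l.foldl (fun m x => if x.2 < m.2 then x else m) a := by
  unfold PySem.List.minD
  rw [min?_cons_pair]
  rfl

lemma minD_eq_innerB (C : PySem.Dict Int Int) (p q i : Int) (h : 2 ≤ i) :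
    PySem.List.minD
      ((PySem.List.pyRange 1 i 1).map
        (fun b => (b, C.getD (i - b) 0 + C.getD b 0 + b * p + (i - b) * q)))
      (fun t => t.2) ((0 : Int), (0 : Int))
    = innerB C p q i := by
  rw [show PySem.List.pyRange 1 i 1 = 1 :: PySem.List.pyRange (1 + 1) i 1 from
    PySem.List.pyRange_one_cons (by omega)]
  simp only [List.map_cons]
  rw [minD_cons_pair, List.foldl_map]
  unfold innerB
  rfl

-- one step of each loop, written out
lemma stepA_eq (p q i : Int) (st : PySem.Dict Int (List Int) × PySem.Dict Int Int) (h : 2 ≤ i) :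
    stepA p q st i
      = (st.1.insert i ((innerB st.2 p q i).1 ::
            (st.1.getD (i - (innerB st.2 p q i).1) [] ++ st.1.getD (innerB st.2 p q i).1 [])),
         st.2.insert i (innerB st.2 p q i).2) := by
  unfold stepA
  dsimp only
  rw [minD_eq_innerB st.2 p q i h]

lemma stepB_eq (p q i : Int) (st : PySem.Dict Int Int × PySem.Dict Int Int) :
    stepB p q st i = (st.1.insert i (innerB st.1 p q i).2, st.2.insert i (innerB st.1 p q i).1) := rfl

-- the first component of innerB is a legal split: 1 ≤ b < i
lemma innerB_bounds (C : PySem.Dict Int Int) (p q i : Int) (h : 2 ≤ i) :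
    1 ≤ (innerB C p q i).1 ∧ (innerB C p q i).1 < i := by
  unfold innerB
  have key : ∀ (l : List Int) (st : Int × Int),
      (∀ b ∈ l, 2 ≤ b ∧ b < i) → 1 ≤ st.1 ∧ st.1 < i →
      1 ≤ (l.foldl (fun st b =>
        let cost := C.getD (i - b) 0 + C.getD b 0 + b * p + (i - b) * q
        if cost < st.2 then (b, cost) else st) st).1 ∧
      (l.foldl (fun st b =>
        let cost := C.getD (i - b) 0 + C.getD b 0 + b * p + (i - b) * q
        if cost < st.2 then (b, cost) else st) st).1 < i := by
    intro l
    induction l with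
    | nil => intro st _ hst; exact hst
    | cons x t ih =>
      intro st hl hst
      simp only [List.foldl_cons]
      apply ih
      · intro b hb; exact hl b (List.mem_cons_of_mem _ hb)
      · have hx := hl x (List.mem_cons_self)
        by_cases hc : C.getD (i - x) 0 + C.getD x 0 + x * p + (i - x) * q < st.2
        · simp only [hc, if_pos]; exact ⟨by omega, hx.2⟩
        · simp only [hc, if_neg, not_false_iff]; exact hst
  apply key
  · intro b hb
    rw [PySem.List.mem_pyRange_one] at hb
    exact hb
  · exact ⟨le_refl 1, by omega⟩

-- stratB only reads split keys in [2, j]; two tables agreeing there give the same strategy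
lemma stratB_congr (s s' : PySem.Dict Int Int) (m : Int)
    (hG : GoodSplit s m)
    (hEq : ∀ j, 2 ≤ j → j ≤ m → s'.getD j 0 = s.getD j 0) :
    ∀ (f : Nat) (j : Int), 1 ≤ j → j ≤ m → j.toNat ≤ f → stratB s' f j = stratB s f j := by
  intro f
  induction f with
  | zero => intro j h1 _ hf; omega
  | succ f ih =>
    intro j h1 hm hf
    by_cases hj : j = 1
    · simp [stratB, hj]
    · have h2 : 2 ≤ j := by omega
      have hb := hG j h2 hm
      have heq := hEq j h2 hm
      simp only [stratB, if_neg hj]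
      rw [heq]
      rw [ih (j - s.getD j 0) (by omega) (by omega) (by omega)]
      rw [ih (s.getD j 0) (by omega) (by omega) (by omega)]

theorem inv_holds (p q : Int) : ∀ (k : Nat), LoopInv p q (1 + k) := by
  intro k
  induction k with
  | zero =>
    refine ⟨rfl, ?_, ?_⟩
    · intro j h2 hm; omega
    · intro j h1 hm f hf
      have hj : j = 1 := by omega
      subst hj
      obtain ⟨f', rfl⟩ : ∃ f', f = f' + 1 := by
        cases f with
        | zero => exfalso; simp at hf
        | succ f' => exact ⟨f', rfl⟩
      show (foldA p q (1 + 0)).1.getD 1 [] = stratB (foldB p q (1 + 0)).2 (f' + 1) 1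
      simp [stratB]
      rfl
  | succ k ih =>
    obtain ⟨hC, hG, hS⟩ := ih
    set m := (1 : Int) + (k : Nat) with hmdef
    have hm1 : 1 ≤ m := by omega
    set i := m + 1 with hidef
    have hi2 : 2 ≤ i := by omega
    have hrange : PySem.List.pyRange 2 (i + 1) 1 = PySem.List.pyRange 2 (m + 1) 1 ++ [i] :=
      PySem.List.pyRange_one_succ_right (by omega)
    have hcast : ((1 : Int) + ((k : Nat) + 1 : Nat)) = i := by push_cast; omega
    have hA : foldA p q ((1 : Int) + ((k : Nat) + 1 : Nat)) = stepA p q (foldA p q m) i := by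
      unfold foldA
      rw [hcast, hrange, List.foldl_append, List.foldl_cons, List.foldl_nil]
    have hB : foldB p q ((1 : Int) + ((k : Nat) + 1 : Nat)) = stepB p q (foldB p q m) i := by
      unfold foldB
      rw [hcast, hrange, List.foldl_append, List.foldl_cons, List.foldl_nil]
    rw [hcast] at hA hB
    have hbnd := innerB_bounds (foldB p q m).1 p q i hi2
    unfold LoopInv
    rw [hcast, hA, hB, stepA_eq p q i (foldA p q m) hi2, stepB_eq, hC]
    dsimp only
    refine ⟨rfl, ?_, ?_⟩
    · -- the extended split table is still good
      intro j h2 hj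
      rw [PySem.Dict.getD_insert]
      by_cases hji : j = i
      · rw [if_pos hji, hji]
        exact hbnd
      · rw [if_neg hji]
        exact hG j h2 (by omega)
    · -- the stored lists equal B's reconstructions
      have hagree : ∀ j, 2 ≤ j → j ≤ m →
          ((foldB p q m).2.insert i (innerB (foldB p q m).1 p q i).1).getD j 0
            = (foldB p q m).2.getD j 0 := by
        intro j h2 hj
        rw [PySem.Dict.getD_insert, if_neg (by omega)]
      intro j h1 hj f hf
      by_cases hji : j = i
      · obtain ⟨f', rfl⟩ : ∃ f', f = f' + 1 := ⟨f - 1, by omega⟩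
        rw [hji] at hf ⊢
        rw [PySem.Dict.getD_insert, if_pos rfl]
        simp only [stratB, if_neg (show ¬ i = 1 by omega)]
        rw [PySem.Dict.getD_insert, if_pos rfl]
        rw [stratB_congr (foldB p q m).2 _ m hG hagree f'
              (i - (innerB (foldB p q m).1 p q i).1) (by omega) (by omega) (by omega)]
        rw [stratB_congr (foldB p q m).2 _ m hG hagree f'
              (innerB (foldB p q m).1 p q i).1 (by omega) (by omega) (by omega)]
        rw [← hS (i - (innerB (foldB p q m).1 p q i).1) (by omega) (by omega) f' (by omega)]
        rw [← hS (innerB (foldB p q m).1 p q i).1 (by omega) (by omega) f' (by omega)]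
      · rw [PySem.Dict.getD_insert, if_neg hji]
        rw [stratB_congr (foldB p q m).2 _ m hG hagree f j h1 (by omega) hf]
        exact hS j h1 (by omega) f hf

-- the loops deliver equal results for every n ≥ 1
theorem main_eq (p q n : Int) (hn : 1 ≤ n) :
    ((foldA p q n).1.getD n [], (foldA p q n).2.getD n 0)
    = (stratB (foldB p q n).2 n.toNat n, (foldB p q n).1.getD n 0) := by
  have hk : n = 1 + ((n - 1).toNat : Int) := by omega
  obtain ⟨hC, hG, hS⟩ := inv_holds p q (n - 1).toNat
  rw [← hk] at hC hG hS
  rw [hS n (by omega) le_rfl n.toNat le_rfl, hC]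

-- ===== VERDICT (by name: the statement is the Claim_ definition above) =====
theorem compute_strategy_spec : Claim_equal_compute_strategy := by
  intro ell e _ hP
  unfold Spec_compute_strategy compute_strategy compute_strategy_alt
  rcases hP with ⟨h2, he⟩ | ⟨h3, he⟩
  · subst h2
    have hn : 1 ≤ PySem.Int.floordiv e 2 := by
      have := PySem.Int.floordiv_mul_add_mod e 2
      have h1 := PySem.Int.mod_nonneg e (by omega : (0:Int) < 2)
      have h2' := PySem.Int.mod_lt e (by omega : (0:Int) < 2)
      omega
    exact main_eq 12 8 (PySem.Int.floordiv e 2) hn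
  · subst h3
    exact main_eq 12 6 e he
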